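-- pv_equiv track=rewrite | github.com/Eiekama/sudoku | sudoku_player.py | findClosestEmptyCell
-- ===== SOURCE A (Python) =====
-- def findClosestEmptyCell(entries,row,col,drow,dcol):
--     # i know the below is technically bad style but its a little difficult to write
--     # a helper function for this so im leaving it as is for now
--     rows,cols = len(entries),len(entries[0])
--     if dcol == 0:
--         leftBound,rightBound = col,col
--         if drow > 0:
--             rowsToCheck = rows-(row+1)
--         elif drow < 0:
--             rowsToCheck = row
--         while leftBound>=0 or rightBound<cols:
--             currRow = row
--             for _ in range(rowsToCheck):
--                 currRow += drow
--                 for column in [leftBound,rightBound]: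
--                     if 0<=column<cols:
--                         currCol = column
--                         if entries[currRow][currCol] == 0: return (currRow,currCol)
--             leftBound -= 1
--             rightBound += 1
--     elif drow == 0:
--         topBound,bottomBound = row,row
--         if dcol > 0:
--             colsToCheck = cols-(col+1)
--         elif dcol < 0:
--             colsToCheck = col
--         while topBound>=0 or bottomBound<rows:
--             currCol = col
--             for _ in range(colsToCheck):
--                 currCol += dcol
--                 for r in [topBound,bottomBound]:
--                     if 0<=r<rows:
--                         currRow = r
--                         if entries[currRow][currCol] == 0: return (currRow,currCol)
--             topBound -= 1
--             bottomBound += 1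
--
--     #if theres no empty cell, selection doesnt change
--     return (row,col)
-- ===== SOURCE B (Python) =====
-- def _pick(best, cand):
--     if best is None or cand[0] < best[0]:
--         return cand
--     return best
--
-- def findClosestEmptyCell(entries, row, col, drow, dcol):
--     # Enumerate every empty cell in the scanned half-board once, and return the
--     # one with the minimal priority key (distance-from-start-line, step, side),
--     # instead of A's expanding-bound early-exit scan.
--     rows, cols = len(entries), len(entries[0])
--     if dcol == 0 and drow != 0:
--         n = rows - row - 1 if drow > 0 else row
--         best = None
--         for k in range(1, n + 1):
--             for c in range(cols):
--                 if entries[row + drow * k][c] == 0: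
--                     best = _pick(best, ((abs(c - col), k, 0 if c < col else 1), (row + drow * k, c)))
--         return best[1] if best is not None else (row, col)
--     if drow == 0 and dcol != 0:
--         n = cols - col - 1 if dcol > 0 else col
--         best = None
--         for k in range(1, n + 1):
--             for r in range(rows):
--                 if entries[r][col + dcol * k] == 0:
--                     best = _pick(best, ((abs(r - row), k, 0 if r < row else 1), (r, col + dcol * k)))
--         return best[1] if best is not None else (row, col)
--     return (row, col)
-- ===== Notes on version B (the rewrite author's own statement) =====
-- stated objective: alternative
-- what changed: Replaces A's expanding left/right-bound while-loop with early-exit scan by a single full enumeration of the scanned half-board that keeps an argmin over the priority key (|cross - start|, step, side), which reproduces A's visit order as a minimum.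
-- outside the precondition, e.g. on findClosestEmptyCell([[1], [1], [0]], 0, 0, 2, 0): A returns (2, 0), B raises IndexError; on findClosestEmptyCell([[1, 1], [0]], 0, 0, 1, 0): A returns (1, 0), B raises IndexError; on findClosestEmptyCell([[0]], 1, 0, -1, 0): A returns (0, 0), B returns (0, 0)
import Mathlib
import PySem

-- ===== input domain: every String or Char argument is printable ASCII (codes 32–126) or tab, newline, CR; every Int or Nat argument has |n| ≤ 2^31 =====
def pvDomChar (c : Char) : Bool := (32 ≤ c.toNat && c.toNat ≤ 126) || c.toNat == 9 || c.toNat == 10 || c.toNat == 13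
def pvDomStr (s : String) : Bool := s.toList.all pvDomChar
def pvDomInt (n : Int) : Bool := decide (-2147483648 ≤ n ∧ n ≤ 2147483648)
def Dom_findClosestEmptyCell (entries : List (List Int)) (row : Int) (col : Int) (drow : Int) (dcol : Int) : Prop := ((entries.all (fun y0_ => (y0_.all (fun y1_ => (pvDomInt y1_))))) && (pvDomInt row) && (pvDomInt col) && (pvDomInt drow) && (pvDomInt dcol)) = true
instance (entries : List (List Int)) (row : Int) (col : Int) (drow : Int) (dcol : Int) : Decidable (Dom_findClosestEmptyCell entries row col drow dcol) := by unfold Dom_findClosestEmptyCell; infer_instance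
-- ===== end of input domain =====

-- B replaces A's expanding-bound early-exit scan by one full enumeration of the scanned
-- half-board with an argmin over the priority key (|cross−start|, step, side): an
-- alternative decomposition of the same search, not claimed faster.

-- ===== PORT A =====
-- entries[r][c] == 0, exact (incl. negative-index wraparound) via pyGetD; where
-- Python would raise IndexError (outside Pre_) the default is returned instead.
def pvCellEmpty (entries : List (List Int)) (r c : Int) : Bool :=
  PySem.List.pyGetD (PySem.List.pyGetD entries r []) c 1 == 0

-- the 'for _ in range(...)' body of A's while loop: advance curr by d, try the
-- lo column then the hi column (A's 'for column in [leftBound,rightBound]').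
def pvInner (e : Int → Int → Bool) (f : Int → Int → Int × Int) (size d lo hi : Int) :
    Nat → Int → Option (Int × Int)
  | 0, _ => none
  | n+1, curr =>
    if 0 ≤ lo ∧ lo < size ∧ e (curr + d) lo = true then some (f (curr + d) lo)
    else if 0 ≤ hi ∧ hi < size ∧ e (curr + d) hi = true then some (f (curr + d) hi)
    else pvInner e f size d lo hi n (curr + d)

-- A's 'while leftBound>=0 or rightBound<cols' loop (generic over the two symmetric branches).
-- 'fuel' only makes the recursion structural: the caller passes (lo+1).toNat + (size-hi).toNat,
-- an upper bound on the number of iterations of Python's (terminating) while loop, and the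
-- fuel-exhausted branch coincides with the loop's own exit (both return the fallback).
def pvOuter (e : Int → Int → Bool) (f : Int → Int → Int × Int) (size d : Int) (N : Nat)
    (fb : Int × Int) : Nat → Int → Int → Int → Int × Int
  | 0, _, _, _ => fb
  | fuel + 1, curr0, lo, hi =>
    if 0 ≤ lo ∨ hi < size then
      match pvInner e f size d lo hi N curr0 with
      | some p => p
      | none => pvOuter e f size d N fb fuel curr0 (lo - 1) (hi + 1)
    else fb

-- rows/cols/rowsToCheck/colsToCheck are inlined ('let' bodies written in place).
def findClosestEmptyCell (entries : List (List Int)) (row : Int) (col : Int) (drow : Int) (dcol : Int) : Int × Int :=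
  if dcol = 0 then
    pvOuter (fun r c => pvCellEmpty entries r c) (fun r c => (r, c))
      ((entries.headD []).length : Int) drow
      (if drow > 0 then (entries.length : Int) - (row + 1)
       else if drow < 0 then row else 0).toNat
      -- drow = 0 here: Python raises UnboundLocalError (rowsToCheck unbound); outside Pre_
      (row, col) ((col + 1).toNat + (((entries.headD []).length : Int) - col).toNat) row col col
  else if drow = 0 then
    pvOuter (fun cc r => pvCellEmpty entries r cc) (fun cc r => (r, cc))
      ((entries.length : Int)) dcol
      (if dcol > 0 then ((entries.headD []).length : Int) - (col + 1)
       else if dcol < 0 then col else 0).toNat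
      (row, col) ((row + 1).toNat + ((entries.length : Int) - row).toNat) col row row
  else (row, col)

-- ===== PORT B =====
-- Python tuple '<' on the (Int,Int,Int) priority keys, lexicographic (exact)
def pvKeyLt (a b : Int × Int × Int) : Bool :=
  decide (a.1 < b.1 ∨ (a.1 = b.1 ∧ (a.2.1 < b.2.1 ∨ (a.2.1 = b.2.1 ∧ a.2.2 < b.2.2))))

-- Source B's _pick helper
def pvPick (best : Option ((Int × Int × Int) × (Int × Int)))
    (cand : (Int × Int × Int) × (Int × Int)) : Option ((Int × Int × Int) × (Int × Int)) :=
  match best with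
  | none => some cand
  | some b => if pvKeyLt cand.1 b.1 = true then some cand else some b

-- Source B's nested 'for k in range(1, n+1): for c in range(size)' argmin loop
def pvBest (e : Int → Int → Bool) (mk : Int → Int → (Int × Int × Int) × (Int × Int))
    (size n : Int) : Option ((Int × Int × Int) × (Int × Int)) :=
  (PySem.List.pyRange 1 (n + 1) 1).foldl (fun best k =>
    (PySem.List.pyRange 0 size 1).foldl (fun best c =>
      if e k c = true then pvPick best (mk k c) else best) best) none

def findClosestEmptyCell_alt (entries : List (List Int)) (row : Int) (col : Int) (drow : Int) (dcol : Int) : Int × Int :=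
  if dcol = 0 ∧ drow ≠ 0 then
    match pvBest (fun k c => pvCellEmpty entries (row + drow * k) c)
        (fun k c => ((|c - col|, k, if c < col then (0:Int) else 1), (row + drow * k, c)))
        ((entries.headD []).length : Int)
        (if drow > 0 then (entries.length : Int) - row - 1 else row) with
    | some b => b.2
    | none => (row, col)
  else if drow = 0 ∧ dcol ≠ 0 then
    match pvBest (fun k r => pvCellEmpty entries r (col + dcol * k))
        (fun k r => ((|r - row|, k, if r < row then (0:Int) else 1), (r, col + dcol * k)))
        ((entries.length : Int))
        (if dcol > 0 then ((entries.headD []).length : Int) - col - 1 else col) with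
    | some b => b.2
    | none => (row, col)
  else (row, col)

-- ===== PRECONDITION & SPEC =====
-- Pre_ excludes inputs where A raises (empty grid; drow = dcol = 0, where rowsToCheck is
-- unbound; scans that run off the board) and, beyond that, restricts the two scanning
-- branches to the function's natural domain — unit step, rectangular grid, cursor on the
-- board — because outside it A's partial scans and negative-index wraparounds are
-- accidental (B eagerly visits the whole half-board and can raise where A returned early).
def Pre_findClosestEmptyCell (entries : List (List Int)) (row : Int) (col : Int) (drow : Int) (dcol : Int) : Prop :=
  entries ≠ [] ∧
  ( (drow ≠ 0 ∧ dcol ≠ 0) ∨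
    ( ((dcol = 0 ∧ (drow = 1 ∨ drow = -1)) ∨ (drow = 0 ∧ (dcol = 1 ∨ dcol = -1))) ∧
      (∀ l ∈ entries, l.length = (entries.headD []).length) ∧
      0 ≤ row ∧ row < (entries.length : Int) ∧
      0 ≤ col ∧ col < ((entries.headD []).length : Int) ) )
instance (entries : List (List Int)) (row : Int) (col : Int) (drow : Int) (dcol : Int) : Decidable (Pre_findClosestEmptyCell entries row col drow dcol) := by unfold Pre_findClosestEmptyCell; infer_instance

def pvWitness_findClosestEmptyCell : List (List Int) × Int × Int × Int × Int :=
  ([[1, 1], [0, 1]], 0, 0, 1, 0)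

def Spec_findClosestEmptyCell (entries : List (List Int)) (row : Int) (col : Int) (drow : Int) (dcol : Int) (out : Int × Int) : Prop := out = findClosestEmptyCell_alt entries row col drow dcol
instance (entries : List (List Int)) (row : Int) (col : Int) (drow : Int) (dcol : Int) (out : Int × Int) : Decidable (Spec_findClosestEmptyCell entries row col drow dcol out) := by unfold Spec_findClosestEmptyCell; infer_instance

-- ===== CLAIM (what is proved, stated in full; the proofs are below) =====
def Claim_equal_findClosestEmptyCell : Prop := ∀ (entries : List (List Int)) (row : Int) (col : Int) (drow : Int) (dcol : Int), Dom_findClosestEmptyCell entries row col drow dcol → Pre_findClosestEmptyCell entries row col drow dcol → Spec_findClosestEmptyCell entries row col drow dcol (findClosestEmptyCell entries row col drow dcol)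

-- ===== LEMMAS AND PROOFS =====

-- current coordinate after i+1 steps of size d
def pvCur (d curr0 : Int) (i : Nat) : Int := curr0 + d * ((i : Int) + 1)

-- the candidate B builds for step i (k = i+1) and cross coordinate c
def pvCandAt (f : Int → Int → Int × Int) (d curr0 s : Int) (i : Nat) (c : Int) :
    (Int × Int × Int) × (Int × Int) :=
  ((|c - s|, (i : Int) + 1, if c < s then (0:Int) else 1), f (pvCur d curr0 i) c)

-- all of B's candidates, in B's visit order
def pvBL (e : Int → Int → Bool) (f : Int → Int → Int × Int) (size d curr0 s : Int) (N : Nat) :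
    List ((Int × Int × Int) × (Int × Int)) :=
  (List.range N).flatMap (fun i =>
    (PySem.List.pyRange 0 size 1).filterMap (fun c =>
      if e (pvCur d curr0 i) c = true then some (pvCandAt f d curr0 s i c) else none))

-- candidates at distance j found during step i, in A's visit order (lo then hi)
def pvCL (e : Int → Int → Bool) (f : Int → Int → Int × Int) (size d curr0 s : Int)
    (j : Int) (i : Nat) : List ((Int × Int × Int) × (Int × Int)) :=
  (([s - j, s + j]).filter
      (fun c => decide (0 ≤ c) && decide (c < size) && e (pvCur d curr0 i) c)).map
    (pvCandAt f d curr0 s i)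

-- candidates at distance j over steps i0, i0+1, …, i0+n-1, in A's visit order
def pvLJ (e : Int → Int → Bool) (f : Int → Int → Int × Int) (size d curr0 s : Int)
    (j : Int) (n i0 : Nat) : List ((Int × Int × Int) × (Int × Int)) :=
  (List.range n).flatMap (fun t => pvCL e f size d curr0 s j (i0 + t))

-- |c - s| as a case split, for omega
theorem pvAbs (c s : Int) : |c - s| = if c < s then s - c else c - s := by
  split_ifs with h
  · rw [abs_of_neg (by omega)]; ring
  · rw [abs_of_nonneg (by omega)]

theorem pvKeyLt_irrefl (a : Int × Int × Int) : pvKeyLt a a = false := by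
  simp [pvKeyLt]

theorem pvKeyLt_trans {a b c : Int × Int × Int} (h1 : pvKeyLt a b = true)
    (h2 : pvKeyLt b c = true) : pvKeyLt a c = true := by
  simp [pvKeyLt] at *; omega

theorem pvKeyLt_total {a b : Int × Int × Int} (h1 : pvKeyLt a b = false)
    (h2 : pvKeyLt b a = false) : a = b := by
  obtain ⟨a1, a2, a3⟩ := a; obtain ⟨b1, b2, b3⟩ := b
  simp [pvKeyLt] at *
  omega

-- the pure (non-Option) running-min step
def pvPick2 (b x : (Int × Int × Int) × (Int × Int)) : (Int × Int × Int) × (Int × Int) :=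
  if pvKeyLt x.1 b.1 = true then x else b

theorem pvFold_some (l : List ((Int × Int × Int) × (Int × Int))) (b) :
    l.foldl pvPick (some b) = some (l.foldl pvPick2 b) := by
  induction l generalizing b with
  | nil => rfl
  | cons x t ih =>
      simp only [List.foldl_cons]
      have : pvPick (some b) x = some (pvPick2 b x) := by
        simp only [pvPick, pvPick2]; split <;> rfl
      rw [this, ih]

theorem pvFold2_mem (l : List ((Int × Int × Int) × (Int × Int))) (b) :
    l.foldl pvPick2 b = b ∨ l.foldl pvPick2 b ∈ l := by
  induction l generalizing b with
  | nil => left; rfl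
  | cons x t ih =>
      simp only [List.foldl_cons]
      rcases ih (pvPick2 b x) with h | h
      · rw [h]; simp only [pvPick2]; split
        · right; simp
        · left; rfl
      · right; simp [h]

theorem pvFold2_min (l : List ((Int × Int × Int) × (Int × Int))) (b) :
    ∀ y, (y = b ∨ y ∈ l) → pvKeyLt y.1 (l.foldl pvPick2 b).1 = false := by
  induction l generalizing b with
  | nil =>
      intro y hy; rcases hy with rfl | h
      · exact pvKeyLt_irrefl _
      · simp at h
  | cons x t ih =>
      intro y hy
      have step : ∀ z : (Int × Int × Int) × (Int × Int),
          pvKeyLt z.1 (pvPick2 b x).1 = false →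
          pvKeyLt z.1 (t.foldl pvPick2 (pvPick2 b x)).1 = false := by
        intro z hz
        have hf := ih (pvPick2 b x) (pvPick2 b x) (Or.inl rfl)
        by_cases hzy : pvKeyLt z.1 (t.foldl pvPick2 (pvPick2 b x)).1 = true
        · by_cases hbz : pvKeyLt (pvPick2 b x).1 z.1 = true
          · have h2 := pvKeyLt_trans hbz hzy
            rw [h2] at hf; cases hf
          · have heq := pvKeyLt_total hz (by simpa using hbz)
            rw [heq] at hzy; rw [hzy] at hf; cases hf
        · simpa using hzy
      have hpick : pvKeyLt b.1 (pvPick2 b x).1 = false ∧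
          pvKeyLt x.1 (pvPick2 b x).1 = false := by
        simp only [pvPick2]; split
        · rename_i hc
          refine ⟨?_, pvKeyLt_irrefl _⟩
          by_cases hb : pvKeyLt b.1 x.1 = true
          · have := pvKeyLt_trans hc hb
            rw [pvKeyLt_irrefl] at this; cases this
          · simpa using hb
        · rename_i hc
          exact ⟨pvKeyLt_irrefl _, by simpa using hc⟩
      simp only [List.foldl_cons]
      rcases hy with rfl | hy
      · exact step y hpick.1
      · rcases List.mem_cons.mp hy with rfl | hy
        · exact step y hpick.2
        · exact ih (pvPick2 b x) y (Or.inr hy)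

theorem pvFold_pick_min (l : List ((Int × Int × Int) × (Int × Int))) (m : (Int × Int × Int) × (Int × Int))
    (hm : m ∈ l) (hmin : ∀ y ∈ l, y ≠ m → pvKeyLt m.1 y.1 = true) :
    l.foldl pvPick none = some m := by
  rcases l with _ | ⟨x, t⟩
  · simp at hm
  · simp only [List.foldl_cons]
    have h0 : pvPick none x = some x := rfl
    rw [h0, pvFold_some]
    have hrmem : t.foldl pvPick2 x = x ∨ t.foldl pvPick2 x ∈ t := pvFold2_mem t x
    have hrl : t.foldl pvPick2 x ∈ x :: t := by
      rcases hrmem with h | h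
      · rw [h]; exact List.mem_cons_self
      · exact List.mem_cons_of_mem _ h
    have hnm : pvKeyLt m.1 (t.foldl pvPick2 x).1 = false :=
      pvFold2_min t x m (by
        rcases List.mem_cons.mp hm with h | h
        · exact Or.inl h
        · exact Or.inr h)
    by_cases hrm : t.foldl pvPick2 x = m
    · rw [hrm]
    · have := hmin _ hrl hrm
      rw [this] at hnm; cases hnm

theorem pvMem_BL {e : Int → Int → Bool} {f : Int → Int → Int × Int} {size d curr0 s : Int}
    {N : Nat} {x : (Int × Int × Int) × (Int × Int)} :
    x ∈ pvBL e f size d curr0 s N ↔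
      ∃ i, i < N ∧ ∃ c, 0 ≤ c ∧ c < size ∧ e (pvCur d curr0 i) c = true ∧
        x = pvCandAt f d curr0 s i c := by
  simp only [pvBL, List.mem_flatMap, List.mem_filterMap, List.mem_range,
    PySem.List.mem_pyRange_one, Option.ite_none_right_eq_some, Option.some.injEq]
  constructor
  · rintro ⟨i, hi, c, ⟨hc0, hcs⟩, he, hx⟩
    exact ⟨i, hi, c, hc0, hcs, he, hx.symm⟩
  · rintro ⟨i, hi, c, hc0, hcs, he, hx⟩
    exact ⟨i, hi, c, ⟨hc0, hcs⟩, he, hx.symm⟩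

theorem pvMem_CL {e : Int → Int → Bool} {f : Int → Int → Int × Int} {size d curr0 s j : Int}
    {i : Nat} {x : (Int × Int × Int) × (Int × Int)} :
    x ∈ pvCL e f size d curr0 s j i ↔
      ∃ c, (c = s - j ∨ c = s + j) ∧ 0 ≤ c ∧ c < size ∧ e (pvCur d curr0 i) c = true ∧
        x = pvCandAt f d curr0 s i c := by
  simp only [pvCL, List.mem_map, List.mem_filter, List.mem_cons,
    Bool.and_eq_true, decide_eq_true_eq, List.not_mem_nil, or_false]
  constructor
  · rintro ⟨a, ⟨hc, ⟨⟨h0, h1⟩, h2⟩⟩, hx⟩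
    exact ⟨a, hc, h0, h1, h2, hx.symm⟩
  · rintro ⟨c, hc, h0, h1, h2, rfl⟩
    exact ⟨c, ⟨hc, ⟨⟨h0, h1⟩, h2⟩⟩, rfl⟩

theorem pvMem_LJ {e : Int → Int → Bool} {f : Int → Int → Int × Int} {size d curr0 s j : Int}
    {n i0 : Nat} {x : (Int × Int × Int) × (Int × Int)} :
    x ∈ pvLJ e f size d curr0 s j n i0 ↔ ∃ t, t < n ∧ x ∈ pvCL e f size d curr0 s j (i0 + t) := by
  simp only [pvLJ, List.mem_flatMap, List.mem_range]

-- the distance component of any candidate at distance j is j (for 0 ≤ j)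
theorem pvCL_key {e : Int → Int → Bool} {f : Int → Int → Int × Int} {size d curr0 s j : Int}
    (hj : 0 ≤ j) {i : Nat} {x : (Int × Int × Int) × (Int × Int)}
    (hx : x ∈ pvCL e f size d curr0 s j i) : x.1.1 = j ∧ x.1.2.1 = (i : Int) + 1 := by
  rcases pvMem_CL.mp hx with ⟨c, hc, _, _, _, rfl⟩
  refine ⟨?_, rfl⟩
  simp only [pvCandAt]
  rcases hc with rfl | rfl <;> rw [pvAbs] <;> split_ifs <;> omega

theorem pvLJ_to_BL {e : Int → Int → Bool} {f : Int → Int → Int × Int} {size d curr0 s j : Int}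
    {N : Nat} {x : (Int × Int × Int) × (Int × Int)}
    (hx : x ∈ pvLJ e f size d curr0 s j N 0) : x ∈ pvBL e f size d curr0 s N := by
  rcases pvMem_LJ.mp hx with ⟨t, ht, hcl⟩
  rw [Nat.zero_add] at hcl
  rcases pvMem_CL.mp hcl with ⟨c, _, h0, h1, h2, rfl⟩
  exact pvMem_BL.mpr ⟨t, ht, c, h0, h1, h2, rfl⟩

theorem pvBL_to_LJ {e : Int → Int → Bool} {f : Int → Int → Int × Int} {size d curr0 s j : Int}
    (hj : 0 ≤ j) {N : Nat} {x : (Int × Int × Int) × (Int × Int)}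
    (hx : x ∈ pvBL e f size d curr0 s N) (hkey : x.1.1 = j) :
    x ∈ pvLJ e f size d curr0 s j N 0 := by
  rcases pvMem_BL.mp hx with ⟨i, hi, c, h0, h1, h2, rfl⟩
  have hdist : |c - s| = j := hkey
  have hc : c = s - j ∨ c = s + j := by
    rw [pvAbs] at hdist; split_ifs at hdist <;> omega
  have hcl : pvCandAt f d curr0 s i c ∈ pvCL e f size d curr0 s j i :=
    pvMem_CL.mpr ⟨c, hc, h0, h1, h2, rfl⟩
  exact pvMem_LJ.mpr ⟨i, hi, by rw [Nat.zero_add]; exact hcl⟩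

theorem pvLJ_succ (e : Int → Int → Bool) (f : Int → Int → Int × Int) (size d curr0 s j : Int)
    (n i0 : Nat) :
    pvLJ e f size d curr0 s j (n + 1) i0
      = pvCL e f size d curr0 s j i0 ++ pvLJ e f size d curr0 s j n (i0 + 1) := by
  simp only [pvLJ, List.range_succ_eq_map, List.flatMap_cons, List.flatMap_map, Nat.add_zero]
  congr 1
  congr 1
  funext a
  congr 1
  omega

theorem pvInner_eq (e : Int → Int → Bool) (f : Int → Int → Int × Int) (size d curr0 s j : Int) :
    ∀ (n i0 : Nat), pvInner e f size d (s - j) (s + j) n (curr0 + d * (i0 : Int))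
      = (pvLJ e f size d curr0 s j n i0).head?.map Prod.snd := by
  intro n
  induction n with
  | zero => intro i0; simp [pvInner, pvLJ]
  | succ n ih =>
      intro i0
      have hcur : curr0 + d * (i0 : Int) + d = pvCur d curr0 i0 := by
        simp only [pvCur]; ring
      simp only [pvInner]
      rw [hcur, pvLJ_succ]
      by_cases h1 : 0 ≤ s - j ∧ s - j < size ∧ e (pvCur d curr0 i0) (s - j) = true
      · have hq1 : (decide (0 ≤ s - j) && decide (s - j < size) && e (pvCur d curr0 i0) (s - j)) = true := by
          simp only [Bool.and_eq_true, decide_eq_true_eq]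
          exact ⟨⟨h1.1, h1.2.1⟩, h1.2.2⟩
        rw [if_pos h1]
        simp only [pvCL, List.filter_cons]
        rw [hq1]
        simp [pvCandAt]
      · have hq1 : (decide (0 ≤ s - j) && decide (s - j < size) && e (pvCur d curr0 i0) (s - j)) = false := by
          by_contra hc
          have ht : (decide (0 ≤ s - j) && decide (s - j < size) && e (pvCur d curr0 i0) (s - j)) = true := by
            revert hc; cases (decide (0 ≤ s - j) && decide (s - j < size) && e (pvCur d curr0 i0) (s - j)) <;> simp
          simp only [Bool.and_eq_true, decide_eq_true_eq] at ht
          exact h1 ⟨ht.1.1, ht.1.2, ht.2⟩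
        rw [if_neg h1]
        by_cases h2 : 0 ≤ s + j ∧ s + j < size ∧ e (pvCur d curr0 i0) (s + j) = true
        · have hq2 : (decide (0 ≤ s + j) && decide (s + j < size) && e (pvCur d curr0 i0) (s + j)) = true := by
            simp only [Bool.and_eq_true, decide_eq_true_eq]
            exact ⟨⟨h2.1, h2.2.1⟩, h2.2.2⟩
          rw [if_pos h2]
          simp only [pvCL, List.filter_cons, List.filter_nil]
          rw [hq1, hq2]
          simp [pvCandAt]
        · have hq2 : (decide (0 ≤ s + j) && decide (s + j < size) && e (pvCur d curr0 i0) (s + j)) = false := by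
            by_contra hc
            have ht : (decide (0 ≤ s + j) && decide (s + j < size) && e (pvCur d curr0 i0) (s + j)) = true := by
              revert hc; cases (decide (0 ≤ s + j) && decide (s + j < size) && e (pvCur d curr0 i0) (s + j)) <;> simp
            simp only [Bool.and_eq_true, decide_eq_true_eq] at ht
            exact h2 ⟨ht.1.1, ht.1.2, ht.2⟩
          rw [if_neg h2]
          simp only [pvCL, List.filter_cons, List.filter_nil]
          rw [hq1, hq2]
          simp only [Bool.false_eq_true, if_false, List.map_nil, List.nil_append]
          have hcur2 : pvCur d curr0 i0 = curr0 + d * (((i0 + 1 : Nat)) : Int) := by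
            simp only [pvCur]; push_cast; ring
          rw [hcur2, ih (i0 + 1)]

theorem pvLJ_pairwise (e : Int → Int → Bool) (f : Int → Int → Int × Int) (size d curr0 s : Int)
    (j : Int) (hj : 0 ≤ j) (n : Nat) :
    ∀ i0, (pvLJ e f size d curr0 s j n i0).Pairwise (fun a b => pvKeyLt a.1 b.1 = true ∨ a = b) := by
  induction n with
  | zero => intro i0; simp [pvLJ]
  | succ n ih =>
      intro i0
      rw [pvLJ_succ]
      apply List.pairwise_append.mpr
      refine ⟨?_, ih (i0 + 1), ?_⟩
      · -- within one step: the filtered [s-j, s+j] pair, mapped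
        have hsub : (([s - j, s + j]).filter
            (fun c => decide (0 ≤ c) && decide (c < size) && e (pvCur d curr0 i0) c)).Sublist
            [s - j, s + j] := List.filter_sublist
        have hsub2 : (pvCL e f size d curr0 s j i0).Sublist
            ([s - j, s + j].map (pvCandAt f d curr0 s i0)) := List.Sublist.map _ hsub
        refine List.Pairwise.sublist hsub2 ?_
        rw [List.map_cons, List.map_cons, List.map_nil, List.pairwise_pair]
        by_cases hj0 : j = 0
        · right; subst hj0; simp
        · left
          simp only [pvCandAt]
          rw [show s - j - s = -j by ring, show s + j - s = j by ring, abs_neg,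
            if_pos (show s - j < s by omega), if_neg (show ¬ s + j < s by omega)]
          simp only [pvKeyLt, decide_eq_true_eq]
          norm_num
      · intro a ha b hb
        have hak := pvCL_key hj ha
        rcases pvMem_LJ.mp hb with ⟨t, ht, hbc⟩
        have hbk := pvCL_key hj hbc
        left
        simp only [pvKeyLt, decide_eq_true_eq]
        right
        constructor
        · omega
        · left
          rw [hak.2, hbk.2]
          push_cast
          omega

theorem pvLJ_head_min {e : Int → Int → Bool} {f : Int → Int → Int × Int} {size d curr0 s : Int}
    {j : Int} (hj : 0 ≤ j) {n i0 : Nat} {x : (Int × Int × Int) × (Int × Int)}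
    (hx : (pvLJ e f size d curr0 s j n i0).head? = some x) :
    ∀ y ∈ pvLJ e f size d curr0 s j n i0, y ≠ x → pvKeyLt x.1 y.1 = true := by
  intro y hy hne
  cases hl : pvLJ e f size d curr0 s j n i0 with
  | nil => rw [hl] at hx; cases hx
  | cons a t =>
      rw [hl] at hx hy
      have hax : a = x := by injection hx
      subst hax
      have hp := pvLJ_pairwise e f size d curr0 s j hj n i0
      rw [hl] at hp
      rcases List.mem_cons.mp hy with rfl | hy
      · exact absurd rfl hne
      · rcases (List.pairwise_cons.mp hp).1 y hy with h | h
        · exact h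
        · exact absurd h.symm hne

theorem pvBL_filter_nil {e : Int → Int → Bool} {f : Int → Int → Int × Int} {size d curr0 s : Int}
    {N : Nat} {j : Int} (hlo : s - j < 0) (hhi : size ≤ s + j) :
    (pvBL e f size d curr0 s N).filter (fun x => decide (j ≤ x.1.1)) = [] := by
  apply List.filter_eq_nil_iff.mpr
  intro x hx
  rcases pvMem_BL.mp hx with ⟨i, _, c, h0, h1, _, rfl⟩
  simp only [pvCandAt, decide_eq_true_eq]
  rw [pvAbs]
  split_ifs <;> omega

theorem pvOuter_eq (e : Int → Int → Bool) (f : Int → Int → Int × Int) (size d curr0 s : Int)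
    (N : Nat) (fb : Int × Int) :
    ∀ (M : Nat) (j : Nat), ((s - (j : Int)) + 1).toNat + (size - (s + (j : Int))).toNat ≤ M →
      pvOuter e f size d N fb M curr0 (s - (j : Int)) (s + (j : Int))
      = (match ((pvBL e f size d curr0 s N).filter
            (fun x => decide ((j : Int) ≤ x.1.1))).foldl pvPick none with
         | some b => b.2
         | none => fb) := by
  intro M
  induction M with
  | zero =>
      intro j hM
      have hlo : s - (j : Int) < 0 := by omega
      have hhi : size ≤ s + (j : Int) := by omega
      rw [pvBL_filter_nil hlo hhi]
      rfl
  | succ M ih =>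
      intro j hM
      by_cases hcond : 0 ≤ s - (j : Int) ∨ s + (j : Int) < size
      · rw [show pvOuter e f size d N fb (M + 1) curr0 (s - (j : Int)) (s + (j : Int))
              = if 0 ≤ s - (j : Int) ∨ s + (j : Int) < size then
                  match pvInner e f size d (s - (j : Int)) (s + (j : Int)) N curr0 with
                  | some p => p
                  | none => pvOuter e f size d N fb M curr0 (s - (j : Int) - 1) (s + (j : Int) + 1)
                else fb from rfl, if_pos hcond]
        have hj0 : (0 : Int) ≤ (j : Int) := Int.natCast_nonneg _
        have hin0 : pvInner e f size d (s - (j : Int)) (s + (j : Int)) N curr0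
            = (pvLJ e f size d curr0 s (j : Int) N 0).head?.map Prod.snd := by
          have h := pvInner_eq e f size d curr0 s (j : Int) N 0
          simpa using h
        rw [hin0]
        cases hl : (pvLJ e f size d curr0 s (j : Int) N 0).head? with
        | none =>
            have hnil : pvLJ e f size d curr0 s (j : Int) N 0 = [] :=
              List.head?_eq_none_iff.mp hl
            simp only [Option.map_none]
            have hs1 : s - (j : Int) - 1 = s - ((j + 1 : Nat) : Int) := by push_cast; ring
            have hs2 : s + (j : Int) + 1 = s + ((j + 1 : Nat) : Int) := by push_cast; ring
            rw [hs1, hs2, ih (j + 1) (by push_cast; omega)]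
            have hfe : (pvBL e f size d curr0 s N).filter
                  (fun x => decide (((j + 1 : Nat) : Int) ≤ x.1.1))
                = (pvBL e f size d curr0 s N).filter (fun x => decide ((j : Int) ≤ x.1.1)) := by
              apply List.filter_congr
              intro x hx
              have hne : x.1.1 ≠ (j : Int) := by
                intro hk
                have hmem := pvBL_to_LJ hj0 hx hk
                rw [hnil] at hmem
                simp at hmem
              simp only [decide_eq_decide]
              push_cast
              omega
            rw [hfe]
        | some x =>
            simp only [Option.map_some]
            have hmem : x ∈ pvLJ e f size d curr0 s (j : Int) N 0 := by
              cases hll : pvLJ e f size d curr0 s (j : Int) N 0 with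
              | nil => rw [hll] at hl; cases hl
              | cons a t =>
                  rw [hll] at hl
                  have : a = x := by injection hl
                  rw [← this]; exact List.mem_cons_self
            have hkey : x.1.1 = (j : Int) := by
              rcases pvMem_LJ.mp hmem with ⟨t, ht, hcl⟩
              exact (pvCL_key hj0 hcl).1
            have hmx : x ∈ (pvBL e f size d curr0 s N).filter
                (fun y => decide ((j : Int) ≤ y.1.1)) :=
              List.mem_filter.mpr ⟨pvLJ_to_BL hmem, by simp [hkey]⟩
            have hmin : ∀ y ∈ (pvBL e f size d curr0 s N).filter
                (fun y => decide ((j : Int) ≤ y.1.1)), y ≠ x → pvKeyLt x.1 y.1 = true := by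
              intro y hy hne
              obtain ⟨hyBL, hyge⟩ := List.mem_filter.mp hy
              have hyge' : (j : Int) ≤ y.1.1 := by simpa using hyge
              by_cases hyk : y.1.1 = (j : Int)
              · exact pvLJ_head_min hj0 hl y (pvBL_to_LJ hj0 hyBL hyk) hne
              · simp only [pvKeyLt, decide_eq_true_eq]
                left
                omega
            rw [pvFold_pick_min _ x hmx hmin]
      · have hlo : s - (j : Int) < 0 := by omega
        have hhi : size ≤ s + (j : Int) := by omega
        rw [show pvOuter e f size d N fb (M + 1) curr0 (s - (j : Int)) (s + (j : Int))
              = if 0 ≤ s - (j : Int) ∨ s + (j : Int) < size then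
                  match pvInner e f size d (s - (j : Int)) (s + (j : Int)) N curr0 with
                  | some p => p
                  | none => pvOuter e f size d N fb M curr0 (s - (j : Int) - 1) (s + (j : Int) + 1)
                else fb from rfl, if_neg hcond, pvBL_filter_nil hlo hhi]
        rfl

theorem pvFoldl_flatMap {α β γ : Type} (l : List α) (g : α → List β) (F : γ → β → γ) :
    ∀ init, (l.flatMap g).foldl F init = l.foldl (fun acc x => (g x).foldl F acc) init := by
  induction l with
  | nil => intro init; rfl
  | cons a t ih =>
      intro init
      simp only [List.flatMap_cons, List.foldl_append, List.foldl_cons]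
      exact ih _

theorem pvFoldl_filterMap {α β γ : Type} (l : List α) (p : α → Bool) (g : α → β) (F : γ → β → γ) :
    ∀ init, (l.filterMap (fun x => if p x = true then some (g x) else none)).foldl F init
      = l.foldl (fun acc x => if p x = true then F acc (g x) else acc) init := by
  induction l with
  | nil => intro init; rfl
  | cons a t ih =>
      intro init
      by_cases hp : p a = true <;> simp [hp, ih]

theorem pvBest_eq (e : Int → Int → Bool) (f : Int → Int → Int × Int) (size d curr0 s n : Int) :
    pvBest (fun k c => e (curr0 + d * k) c)
      (fun k c => ((|c - s|, k, if c < s then (0:Int) else 1), f (curr0 + d * k) c)) size n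
    = (pvBL e f size d curr0 s n.toNat).foldl pvPick none := by
  unfold pvBest pvBL
  rw [PySem.List.pyRange_one 1 (n + 1), show ((n + 1 : Int) - 1).toNat = n.toNat by omega,
    List.foldl_map, pvFoldl_flatMap]
  apply PySem.List.foldl_congr_mem
  intro acc i _
  rw [pvFoldl_filterMap]
  apply PySem.List.foldl_congr_mem
  intro acc2 c _
  have hk : (1 : Int) + (i : Int) = (i : Int) + 1 := by ring
  simp only [pvCur, pvCandAt, hk]

theorem pvMain (e : Int → Int → Bool) (f : Int → Int → Int × Int) (size d curr0 s n : Int)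
    (fb : Int × Int) :
    pvOuter e f size d n.toNat fb ((s + 1).toNat + (size - s).toNat) curr0 s s
    = match pvBest (fun k c => e (curr0 + d * k) c)
        (fun k c => ((|c - s|, k, if c < s then (0:Int) else 1), f (curr0 + d * k) c)) size n with
      | some b => b.2
      | none => fb := by
  have h := pvOuter_eq e f size d curr0 s n.toNat fb
      (((s - ((0 : Nat) : Int)) + 1).toNat + (size - (s + ((0 : Nat) : Int))).toNat) 0 (le_refl _)
  simp only [Nat.cast_zero, sub_zero, add_zero] at h
  rw [h]
  have hfe : (pvBL e f size d curr0 s n.toNat).filter (fun x => decide ((0 : Int) ≤ x.1.1))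
      = pvBL e f size d curr0 s n.toNat := by
    apply List.filter_eq_self.mpr
    intro x hx
    rcases pvMem_BL.mp hx with ⟨i, _, c, _, _, _, rfl⟩
    simp [pvCandAt, abs_nonneg]
  rw [hfe, pvBest_eq e f size d curr0 s n]

-- ===== VERDICT (by name: the statement is the Claim_ definition above) =====
theorem findClosestEmptyCell_spec : Claim_equal_findClosestEmptyCell := by
  intro entries row col drow dcol _hdom hpre
  unfold Spec_findClosestEmptyCell findClosestEmptyCell findClosestEmptyCell_alt
  obtain ⟨hne, hcases⟩ := hpre
  by_cases hdc : dcol = 0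
  · have hdr : drow ≠ 0 := by
      rcases hcases with ⟨h1, _⟩ | ⟨(⟨_, h⟩ | ⟨_, h⟩), _⟩
      · exact h1
      · rcases h with h | h <;> omega
      · rcases h with h | h <;> omega
    subst hdc
    have hN : (if drow > 0 then (entries.length : Int) - (row + 1)
               else if drow < 0 then row else 0)
            = (if drow > 0 then (entries.length : Int) - row - 1 else row) := by
      split_ifs <;> omega
    rw [if_pos (show (0:Int) = 0 from rfl),
        if_pos (show (0:Int) = 0 ∧ drow ≠ 0 from ⟨rfl, hdr⟩), hN]
    exact pvMain (fun r c => pvCellEmpty entries r c) (fun r c => (r, c))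
      ((entries.headD []).length : Int) drow row col
      (if drow > 0 then (entries.length : Int) - row - 1 else row) (row, col)
  · by_cases hdr0 : drow = 0
    · subst hdr0
      have hN : (if dcol > 0 then ((entries.headD []).length : Int) - (col + 1)
                 else if dcol < 0 then col else 0)
              = (if dcol > 0 then ((entries.headD []).length : Int) - col - 1 else col) := by
        split_ifs <;> omega
      rw [if_neg hdc, if_pos (show (0:Int) = 0 from rfl),
          if_neg (show ¬ (dcol = 0 ∧ (0:Int) ≠ 0) from fun h => hdc h.1),
          if_pos (show (0:Int) = 0 ∧ dcol ≠ 0 from ⟨rfl, hdc⟩), hN]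
      exact pvMain (fun cc r => pvCellEmpty entries r cc) (fun cc r => (r, cc))
        ((entries.length : Int)) dcol col row
        (if dcol > 0 then ((entries.headD []).length : Int) - col - 1 else col) (row, col)
    · rw [if_neg hdc, if_neg hdr0,
          if_neg (show ¬ (dcol = 0 ∧ drow ≠ 0) from fun h => hdc h.1),
          if_neg (show ¬ (drow = 0 ∧ dcol ≠ 0) from fun h => hdr0 h.1)]
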